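-- pv_equiv track=rewrite | github.com/truckhome-test-dev/tk-test-platform | test_code/scheduling.py | _r_task
-- ===== SOURCE A (Python) =====
-- def _r_task(index, num, taskname):
--     # 整理单个排期的数据格式
--     l = []
--     for i in range(0, index):
--         l.append('')
--     for i in range(index, index + num):
--         l.append(taskname)
--     for i in range(index + num, 31):
--         l.append('')
--     return l[:12]
-- ===== SOURCE B (Python) =====
-- def _r_task(index, num, taskname):
--     # Allocate the 12-cell visible row directly and fill the clamped task span.
--     row = [''] * 12
--     start = max(index, 0)
--     stop = min(start + max(num, 0), 12)
--     for j in range(start, stop):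
--         row[j] = taskname
--     return row
-- ===== Notes on version B (the rewrite author's own statement) =====
-- stated objective: simpler
-- what changed: B allocates the 12-cell result directly and fills only the overlap of the clamped task span with the visible window, instead of building a >=31-element timeline with three append loops and slicing it to 12.
import Mathlib
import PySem

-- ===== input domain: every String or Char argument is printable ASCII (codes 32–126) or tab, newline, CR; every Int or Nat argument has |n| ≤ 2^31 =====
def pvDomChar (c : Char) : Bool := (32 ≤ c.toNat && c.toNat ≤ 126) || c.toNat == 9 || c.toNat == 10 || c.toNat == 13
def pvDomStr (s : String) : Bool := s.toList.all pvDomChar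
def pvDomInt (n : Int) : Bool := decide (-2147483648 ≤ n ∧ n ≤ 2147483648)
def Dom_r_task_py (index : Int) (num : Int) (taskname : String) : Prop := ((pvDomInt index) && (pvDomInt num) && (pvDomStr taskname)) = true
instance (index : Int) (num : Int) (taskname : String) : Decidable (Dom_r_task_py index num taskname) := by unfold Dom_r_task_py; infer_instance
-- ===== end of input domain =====

-- B allocates the 12-cell result directly and fills the clamped overlap of the task span
-- with the visible window, instead of building a 31+-cell timeline and slicing (simpler).

-- ===== PORT A =====
-- the three append loops keep l as a reverse accumulator ('' :: l) and reverse once at the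
-- end: same loop structure and same list values as Python's l.append, in linear time
def r_task_py (index : Int) (num : Int) (taskname : String) : List String :=
  let l : List String := []
  let l := (PySem.List.pyRange 0 index 1).foldl (fun l _ => "" :: l) l
  let l := (PySem.List.pyRange index (index + num) 1).foldl (fun l _ => taskname :: l) l
  let l := (PySem.List.pyRange (index + num) 31 1).foldl (fun l _ => "" :: l) l
  PySem.List.slice l.reverse none (some 12)

-- ===== PORT B =====
def r_task_py_alt (index : Int) (num : Int) (taskname : String) : List String :=
  let row : List String := List.replicate 12 ""
  let start := max index 0
  let stop := min (start + max num 0) 12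
  (PySem.List.pyRange start stop 1).foldl (fun r j => r.set j.toNat taskname) row

-- ===== PRECONDITION & SPEC =====
def Spec_r_task_py (index : Int) (num : Int) (taskname : String) (out : List String) : Prop := out = r_task_py_alt index num taskname
instance (index : Int) (num : Int) (taskname : String) (out : List String) : Decidable (Spec_r_task_py index num taskname out) := by unfold Spec_r_task_py; infer_instance

-- ===== CLAIM (what is proved, stated in full; the proofs are below) =====
def Claim_equal_r_task_py : Prop := ∀ (index : Int) (num : Int) (taskname : String), Dom_r_task_py index num taskname → Spec_r_task_py index num taskname (r_task_py index num taskname)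

-- ===== LEMMAS AND PROOFS =====

-- the fill loop of B: element k of the result
theorem fill_getElem? (a b : Int) (v : String) (row : List String)
    (ha : 0 ≤ a) (hb : b ≤ (row.length : Int)) (k : Nat) :
    ((PySem.List.pyRange a b 1).foldl (fun r j => r.set j.toNat v) row)[k]? =
      if a ≤ (k : Int) ∧ (k : Int) < b then some v else row[k]? := by
  by_cases h : b ≤ a
  · rw [PySem.List.pyRange_one_eq_nil h]
    simp only [List.foldl_nil]
    split_ifs with hk
    · omega
    · rfl
  · rw [PySem.List.pyRange_one_cons (by omega)]
    simp only [List.foldl_cons]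
    have hrec := fill_getElem? (a + 1) b v (row.set a.toNat v) (by omega) (by simpa using hb) k
    rw [hrec]
    by_cases hk : a ≤ (k : Int) ∧ (k : Int) < b
    · by_cases hk1 : a + 1 ≤ (k : Int)
      · simp [hk, hk1]
      · have hka : a.toNat = k := by omega
        have hkl : k < row.length := by omega
        simp only [if_pos hk, if_neg (by omega : ¬ (a + 1 ≤ (k:Int) ∧ (k:Int) < b))]
        rw [hka, List.getElem?_set_self (by omega)]
    · simp only [if_neg hk, if_neg (by omega : ¬ (a + 1 ≤ (k:Int) ∧ (k:Int) < b))]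
      rw [List.getElem?_set_ne (by omega)]
termination_by (b - a).toNat
decreasing_by omega

theorem alt_getElem? (index num : Int) (v : String) (k : Nat) :
    (r_task_py_alt index num v)[k]? =
      if max index 0 ≤ (k : Int) ∧ (k : Int) < min (max index 0 + max num 0) 12 then some v
      else (List.replicate 12 "")[k]? := by
  unfold r_task_py_alt
  exact fill_getElem? _ _ v _ (by omega) (by simp) k

-- a reverse-accumulator append loop prepends one replicate block
theorem foldl_cons_const (rs : List Int) (v : String) (acc : List String) :
    rs.foldl (fun l _ => v :: l) acc = List.replicate rs.length v ++ acc := by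
  induction rs generalizing acc with
  | nil => rfl
  | cons x t ih =>
      rw [List.foldl_cons, ih, show v :: acc = [v] ++ acc from rfl, ← List.append_assoc,
        ← List.replicate_succ', List.replicate_succ, List.cons_append, List.length_cons, List.replicate_succ, List.cons_append]

-- A as take 12 of three replicate blocks
theorem a_eq_take (index num : Int) (v : String) :
    r_task_py index num v =
      (List.replicate index.toNat "" ++ List.replicate num.toNat v ++
        List.replicate (31 - (index + num)).toNat "").take 12 := by
  unfold r_task_py
  simp only []
  rw [foldl_cons_const, foldl_cons_const, foldl_cons_const]
  rw [PySem.List.length_pyRange_one, PySem.List.length_pyRange_one, PySem.List.length_pyRange_one]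
  rw [show (12 : Int) = ((12 : Nat) : Int) from rfl, PySem.List.slice_to_natCast]
  have h1 : index - 0 = index := by ring
  have h2 : index + num - index = num := by ring
  rw [h1, h2]
  simp [List.reverse_append, List.append_assoc]

theorem rep3_getElem? (s t r : Nat) (v : String) (k : Nat) (hk : k < s + t + r) :
    (List.replicate s "" ++ List.replicate t v ++ List.replicate r "")[k]? =
      some (if s ≤ k ∧ k < s + t then v else "") := by
  simp only [List.getElem?_append, List.length_append, List.length_replicate,
    List.getElem?_replicate]
  split_ifs <;> first | rfl | omega

-- ===== VERDICT (by name: the statement is the Claim_ definition above) =====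
theorem r_task_py_spec : Claim_equal_r_task_py := by
  intro index num v _
  unfold Spec_r_task_py
  apply List.ext_getElem?
  intro k
  rw [a_eq_take, alt_getElem? index num v k]
  by_cases hk : k < 12
  · rw [List.getElem?_take_of_lt hk]
    rw [rep3_getElem? _ _ _ v k (by omega)]
    by_cases hc : index.toNat ≤ k ∧ k < index.toNat + num.toNat
    · rw [if_pos hc, if_pos (by omega)]
    · rw [if_neg hc, if_neg (by omega), List.getElem?_replicate, if_pos hk]
  · have hA : ((List.replicate index.toNat "" ++ List.replicate num.toNat v ++
        List.replicate (31 - (index + num)).toNat "").take 12)[k]? = none := by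
      apply List.getElem?_eq_none
      exact le_trans (List.length_take_le _ _) (by omega)
    rw [hA, if_neg (by omega)]
    symm
    apply List.getElem?_eq_none
    simp; omega
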